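-- pv_equiv track=rewrite | github.com/JeremyBYU/VisualizeGuassianSurface | scripts/uv.py | cell_values_to_strips
-- ===== SOURCE A (Python) =====
-- def cell_values_to_strips(cells_list, cells_values):
--
--     idx = 0
--     cells_values_list = []
--     for i in range(len(cells_list)):
--         cells = cells_list[i]
--         num_cells = len(cells)
--         values_list = cells_values[idx:idx+num_cells]
--         cells_values_list.append(values_list)
--         idx += num_cells
--     return cells_values_list
-- ===== SOURCE B (Python) =====
-- def cell_values_to_strips(cells_list, cells_values):
--     # Stream the flat values through a single shared iterator; each chunk is
--     # filled element-by-element by zipping its cell sublist against the iterator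
--     # (zip stops when either side runs out, so leftovers are dropped and short
--     # tails give short chunks). No indices, no offsets, no slicing.
--     it = iter(cells_values)
--     return [[v for _, v in zip(cells, it)] for cells in cells_list]
-- ===== Notes on version B (the rewrite author's own statement) =====
-- stated objective: alternative
-- what changed: Replaces index arithmetic and slicing entirely: B streams the flat values through one shared iterator and fills each chunk element-by-element by zipping the cell sublist against the iterator, instead of A's running-offset slicing.
import Mathlib
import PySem

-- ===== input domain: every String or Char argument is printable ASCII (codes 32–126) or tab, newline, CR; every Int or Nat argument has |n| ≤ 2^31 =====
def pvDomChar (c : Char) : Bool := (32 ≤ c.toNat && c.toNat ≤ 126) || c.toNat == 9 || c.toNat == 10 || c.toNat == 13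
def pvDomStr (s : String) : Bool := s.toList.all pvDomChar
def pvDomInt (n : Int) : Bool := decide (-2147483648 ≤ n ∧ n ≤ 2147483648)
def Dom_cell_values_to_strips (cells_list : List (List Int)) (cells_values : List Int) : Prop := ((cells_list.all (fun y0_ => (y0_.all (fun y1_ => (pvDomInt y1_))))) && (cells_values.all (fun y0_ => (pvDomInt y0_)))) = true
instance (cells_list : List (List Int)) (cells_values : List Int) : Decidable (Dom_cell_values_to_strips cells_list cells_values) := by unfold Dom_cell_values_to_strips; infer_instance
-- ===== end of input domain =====

-- B streams the flat values through one shared iterator, zipping each cell sublist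
-- against it (alternative decomposition, same cost); A slices with a running offset.

-- ===== PORT A =====
-- literal port of A: one loop over cells_list carrying (idx, accumulated output)
def cell_values_to_strips (cells_list : List (List Int)) (cells_values : List Int) : List (List Int) :=
  (cells_list.foldl
    (fun (st : Int × List (List Int)) cells =>
      let num_cells : Int := cells.length
      (st.1 + num_cells,
       st.2 ++ [PySem.List.slice cells_values (some st.1) (some (st.1 + num_cells))]))
    ((0 : Int), ([] : List (List Int)))).2

-- ===== PORT B =====
-- literal port of B: the shared iterator's unconsumed remainder is the list `rest`;
-- zipping `cells` against the iterator yields (cells.zip rest).map (·.2) and consumes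
-- that many elements, i.e. the iterator's remainder becomes rest.drop cells.length.
def pvStream (cells_list : List (List Int)) (rest : List Int) : List (List Int) :=
  match cells_list with
  | [] => []
  | cells :: tl => (cells.zip rest).map (·.2) :: pvStream tl (rest.drop cells.length)

def cell_values_to_strips_alt (cells_list : List (List Int)) (cells_values : List Int) : List (List Int) :=
  pvStream cells_list cells_values

-- ===== PRECONDITION & SPEC =====
def Spec_cell_values_to_strips (cells_list : List (List Int)) (cells_values : List Int) (out : List (List Int)) : Prop := out = cell_values_to_strips_alt cells_list cells_values
instance (cells_list : List (List Int)) (cells_values : List Int) (out : List (List Int)) : Decidable (Spec_cell_values_to_strips cells_list cells_values out) := by unfold Spec_cell_values_to_strips; infer_instance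

-- ===== CLAIM =====
def Claim_equal_cell_values_to_strips : Prop := ∀ (cells_list : List (List Int)) (cells_values : List Int), Dom_cell_values_to_strips cells_list cells_values → Spec_cell_values_to_strips cells_list cells_values (cell_values_to_strips cells_list cells_values)

-- ===== LEMMAS AND PROOFS =====

theorem map_snd_zip_eq_take {α β : Type} (l : List α) (r : List β) :
    (l.zip r).map (·.2) = r.take l.length := by
  induction l generalizing r with
  | nil => simp
  | cons a tl ih =>
      cases r with
      | nil => simp
      | cons b rt => simp [ih]

theorem foldA_eq (cv : List Int) (l : List (List Int)) :
    ∀ (n : Nat) (acc : List (List Int)),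
      (l.foldl
        (fun (st : Int × List (List Int)) cells =>
          let num_cells : Int := cells.length
          (st.1 + num_cells,
           st.2 ++ [PySem.List.slice cv (some st.1) (some (st.1 + num_cells))]))
        ((n : Int), acc)).2 = acc ++ pvStream l (cv.drop n) := by
  induction l with
  | nil => intro n acc; simp [pvStream]
  | cons c rest ih =>
      intro n acc
      simp only [List.foldl_cons]
      have hc : ((n : Int) + (c.length : Int)) = (((n + c.length : Nat)) : Int) := by
        push_cast; ring
      rw [hc, ih]
      simp [pvStream, PySem.List.slice_natCast_add, map_snd_zip_eq_take, List.drop_drop]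

-- ===== VERDICT =====
theorem cell_values_to_strips_spec : Claim_equal_cell_values_to_strips := by
  intro cl cv _
  show cell_values_to_strips cl cv = cell_values_to_strips_alt cl cv
  simp only [cell_values_to_strips, cell_values_to_strips_alt]
  have := foldA_eq cv cl 0 []
  simpa using this
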